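-- pv_equiv track=rewrite | github.com/zncheng/dramanalysis | prediction/prediction.py | features_generation
-- ===== SOURCE A (Python) =====
-- def features_generation(groups):
--     tmp = ['sid','predict_time']
--     one_hot = ['model_A1','model_A2','model_B1','model_B2','model_B3','model_C1','model_C2','dimm_num_8','dimm_num_12','dimm_num_16','dimm_num_24','manufacturer_M1','manufacturer_M2','manufacturer_M3','manufacturer_M4']
--     feature = ''
--     for metric in ['counter','mtbe','read','scrub','soft','hard']:
--         tmp.append('5min' + str('_') + metric)
--     if (groups == 2 or groups == 3 or groups == 4):
--         for metric in ['socket_error','channel_error','bank_error','row_error', 'column_error','cell_error', 'random_error', 'socket_count', 'channel_count','bank_count', 'row_count','col_count','cell_count']: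
--             tmp.append('5min' + str('_') + metric)
--         if (groups == 3 or groups == 4):
--             for metric in ['socket_mean','socket_median','socket_std', 'channel_mean','channel_median','channel_std','bank_mean','bank_median','bank_std','row_mean','row_median','row_std','col_mean','col_median','col_std','cell_mean','cell_median','cell_std']:
--                 tmp.append('5min' + str('_') + metric)
--         if (groups == 4):
--             tmp = tmp + one_hot
--     tmp = tmp + ['class']
--     return tmp
-- ===== SOURCE B (Python) =====
-- def features_generation(groups):
--     # Complete catalogue of every possible feature, in output order, each tagged
--     # with the minimum "level" at which it appears; the result is a single
--     # filtering pass over this catalogue.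
--     catalogue = [(0, 'sid'), (0, 'predict_time')]
--     catalogue += [(0, '5min_' + m) for m in
--                   ['counter', 'mtbe', 'read', 'scrub', 'soft', 'hard']]
--     catalogue += [(1, '5min_' + m) for m in
--                   ['socket_error', 'channel_error', 'bank_error', 'row_error',
--                    'column_error', 'cell_error', 'random_error', 'socket_count',
--                    'channel_count', 'bank_count', 'row_count', 'col_count',
--                    'cell_count']]
--     catalogue += [(2, '5min_' + m) for m in
--                   ['socket_mean', 'socket_median', 'socket_std', 'channel_mean',
--                    'channel_median', 'channel_std', 'bank_mean', 'bank_median',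
--                    'bank_std', 'row_mean', 'row_median', 'row_std', 'col_mean',
--                    'col_median', 'col_std', 'cell_mean', 'cell_median',
--                    'cell_std']]
--     catalogue += [(3, n) for n in
--                   ['model_A1', 'model_A2', 'model_B1', 'model_B2', 'model_B3',
--                    'model_C1', 'model_C2', 'dimm_num_8', 'dimm_num_12',
--                    'dimm_num_16', 'dimm_num_24', 'manufacturer_M1',
--                    'manufacturer_M2', 'manufacturer_M3', 'manufacturer_M4']]
--     catalogue.append((0, 'class'))
--     level = groups - 1 if groups in (2, 3, 4) else 0
--     return [name for tag, name in catalogue if tag <= level]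
-- ===== Notes on version B (the rewrite author's own statement) =====
-- stated objective: alternative
-- what changed: A conditionally appends blocks via nested groups-equality branches; B builds one complete catalogue of all possible features tagged with a minimum level and produces the result as a single filter pass over that catalogue.
import Mathlib
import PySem

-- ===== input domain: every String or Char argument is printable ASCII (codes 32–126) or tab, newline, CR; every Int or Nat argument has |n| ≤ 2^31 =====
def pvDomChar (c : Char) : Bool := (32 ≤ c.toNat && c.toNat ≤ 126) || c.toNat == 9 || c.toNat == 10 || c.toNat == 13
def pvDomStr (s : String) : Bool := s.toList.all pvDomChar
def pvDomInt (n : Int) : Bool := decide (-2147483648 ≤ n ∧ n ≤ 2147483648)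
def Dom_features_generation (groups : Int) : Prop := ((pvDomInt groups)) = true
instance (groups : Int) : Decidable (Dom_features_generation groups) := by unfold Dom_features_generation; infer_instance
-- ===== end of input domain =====

-- ===== PORT A =====
-- B replaces A's nested conditional block-appending by one tagged feature
-- catalogue filtered in a single pass (objective: alternative decomposition).
def features_generation (groups : Int) : List String :=
  let tmp : List String := ["sid", "predict_time"]
  let one_hot : List String := ["model_A1","model_A2","model_B1","model_B2","model_B3","model_C1","model_C2","dimm_num_8","dimm_num_12","dimm_num_16","dimm_num_24","manufacturer_M1","manufacturer_M2","manufacturer_M3","manufacturer_M4"]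
  let tmp := (["counter","mtbe","read","scrub","soft","hard"]).foldl
    (fun acc metric => acc ++ [("5min" ++ "_") ++ metric]) tmp
  let tmp :=
    if groups == 2 || groups == 3 || groups == 4 then
      let tmp := (["socket_error","channel_error","bank_error","row_error","column_error","cell_error","random_error","socket_count","channel_count","bank_count","row_count","col_count","cell_count"]).foldl
        (fun acc metric => acc ++ [("5min" ++ "_") ++ metric]) tmp
      let tmp :=
        if groups == 3 || groups == 4 then
          (["socket_mean","socket_median","socket_std","channel_mean","channel_median","channel_std","bank_mean","bank_median","bank_std","row_mean","row_median","row_std","col_mean","col_median","col_std","cell_mean","cell_median","cell_std"]).foldl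
            (fun acc metric => acc ++ [("5min" ++ "_") ++ metric]) tmp
        else tmp
      if groups == 4 then tmp ++ one_hot else tmp
    else tmp
  tmp ++ ["class"]

-- ===== PORT B =====
def features_generation_alt (groups : Int) : List String :=
  let catalogue : List (Int × String) :=
    [(0, "sid"), (0, "predict_time")]
    ++ (["counter","mtbe","read","scrub","soft","hard"]).map (fun m => ((0:Int), "5min_" ++ m))
    ++ (["socket_error","channel_error","bank_error","row_error","column_error","cell_error","random_error","socket_count","channel_count","bank_count","row_count","col_count","cell_count"]).map (fun m => ((1:Int), "5min_" ++ m))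
    ++ (["socket_mean","socket_median","socket_std","channel_mean","channel_median","channel_std","bank_mean","bank_median","bank_std","row_mean","row_median","row_std","col_mean","col_median","col_std","cell_mean","cell_median","cell_std"]).map (fun m => ((2:Int), "5min_" ++ m))
    ++ (["model_A1","model_A2","model_B1","model_B2","model_B3","model_C1","model_C2","dimm_num_8","dimm_num_12","dimm_num_16","dimm_num_24","manufacturer_M1","manufacturer_M2","manufacturer_M3","manufacturer_M4"]).map (fun n => ((3:Int), n))
    ++ [(0, "class")]
  let level : Int := if ([(2:Int), 3, 4]).contains groups then groups - 1 else 0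
  catalogue.filterMap (fun p => if p.1 ≤ level then some p.2 else none)

-- ===== PRECONDITION & SPEC =====
def Spec_features_generation (groups : Int) (out : List String) : Prop := out = features_generation_alt groups
instance (groups : Int) (out : List String) : Decidable (Spec_features_generation groups out) := by unfold Spec_features_generation; infer_instance

-- ===== CLAIM (what is proved, stated in full; the proofs are below) =====
def Claim_equal_features_generation : Prop := ∀ (groups : Int), Dom_features_generation groups → Spec_features_generation groups (features_generation groups)

-- ===== LEMMAS AND PROOFS =====

-- ===== VERDICT (by name: the statement is the Claim_ definition above) =====
theorem features_generation_spec : Claim_equal_features_generation := by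
  unfold Claim_equal_features_generation
  intro groups _
  unfold Spec_features_generation features_generation features_generation_alt
  by_cases h2 : groups = 2
  · subst h2; decide
  · by_cases h3 : groups = 3
    · subst h3; decide
    · by_cases h4 : groups = 4
      · subst h4; decide
      · simp [h2, h3, h4]
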